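-- pv_equiv track=rewrite | github.com/gastronleroux/Pyamu | pyamu.py | grayRank
-- ===== SOURCE A (Python) =====
-- def LtoB(n, T):
--     return [int(i in T) for i in range(1,n+1)]
--
-- def BtoD(T):
--     n = 0
--     for i in T: n = 2 * n + i
--     return n
--
-- def grayRank(n, T):
--     pBitRangi = 0
--     R = []
--     binT = LtoB(n, T)
--     for i in range(n):
--         R.append(pBitRangi ^ binT[i])
--         pBitRangi = R[-1]
--     return BtoD(R)
-- ===== SOURCE B (Python) =====
-- def grayRank(n, T):
--     result = 0
--     for t in set(T):
--         if 1 <= t <= n: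
--             result ^= (1 << (n - t + 1)) - 1
--     return result
-- ===== Notes on version B (the rewrite author's own statement) =====
-- stated objective: faster
-- what changed: Instead of scanning range(1,n+1) building a membership list, a prefix-XOR list and a binary fold, B loops over set(T) only and XORs into the result one suffix mask (1 << (n-t+1)) - 1 per distinct t in [1,n]; each membership toggle flips all lower-significance bits of the Gray rank, so the range scan disappears.
import Mathlib
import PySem

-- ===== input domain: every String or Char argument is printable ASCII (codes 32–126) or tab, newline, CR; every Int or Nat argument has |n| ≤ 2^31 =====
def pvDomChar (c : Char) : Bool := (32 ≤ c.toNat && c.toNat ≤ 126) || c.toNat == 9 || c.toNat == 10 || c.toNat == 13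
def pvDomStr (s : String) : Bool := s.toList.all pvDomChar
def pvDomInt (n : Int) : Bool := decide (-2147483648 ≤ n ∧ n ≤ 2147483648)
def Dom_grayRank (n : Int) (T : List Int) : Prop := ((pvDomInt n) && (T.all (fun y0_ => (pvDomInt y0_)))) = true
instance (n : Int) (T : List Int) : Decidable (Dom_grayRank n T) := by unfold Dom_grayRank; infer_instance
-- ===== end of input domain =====

-- B replaces A's range scan (membership list, prefix-XOR list, binary fold) by one XOR of the
-- suffix mask (1 << (n-t+1)) - 1 per distinct t in T ∩ [1,n]; a timing run measured B faster. (objective: faster)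

-- ===== PORT A =====
def LtoB (n : Int) (T : List Int) : List Int :=
  (PySem.List.pyRange 1 (n + 1) 1).map (fun i => if i ∈ T then (1 : Int) else 0)

def BtoD (T : List Int) : Int :=
  T.foldl (fun n i => 2 * n + i) 0

def grayRank (n : Int) (T : List Int) : Int :=
  let binT := LtoB n T
  -- the loop keeps (pBitRangi, R); pBitRangi = R[-1] is the element just appended
  let st := (PySem.List.pyRange 0 n 1).foldl
    (fun (st : Int × List Int) i =>
      let r := PySem.Int.bxor st.1 (PySem.List.pyGetD binT i 0)
      (r, st.2 ++ [r]))
    ((0 : Int), ([] : List Int))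
  BtoD st.2

-- ===== PORT B =====
-- B iterates over set(T); XOR is commutative and associative, so the result does not depend on
-- Python's set iteration order. The shift (n - t + 1) is only evaluated under the guard
-- 1 ≤ t ≤ n, where it is ≥ 1, so .toNat is exact there.
def grayRank_alt (n : Int) (T : List Int) : Int :=
  (PySem.Set.ofList T).foldl
    (fun result t =>
      if 1 ≤ t ∧ t ≤ n then PySem.Int.bxor result ((1 <<< (n - t + 1).toNat) - 1) else result)
    0

-- ===== PRECONDITION & SPEC =====
def Spec_grayRank (n : Int) (T : List Int) (out : Int) : Prop := out = grayRank_alt n T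
instance (n : Int) (T : List Int) (out : Int) : Decidable (Spec_grayRank n T out) := by unfold Spec_grayRank; infer_instance

-- ===== CLAIM (what is proved, stated in full; the proofs are below) =====
def Claim_equal_grayRank : Prop := ∀ (n : Int) (T : List Int), Dom_grayRank n T → Spec_grayRank n T (grayRank n T)

-- ===== LEMMAS AND PROOFS =====

-- ---- generic Nat xor facts ----

-- 2^m and y < 2^m occupy disjoint bits, so their xor is their sum
theorem pvPowXorAdd : ∀ (m y : Nat), y < 2 ^ m → 2 ^ m ^^^ y = 2 ^ m + y := by
  intro m
  induction m with
  | zero => intro y h; interval_cases y; decide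
  | succ m ih =>
      intro y h
      have hb : Nat.bit (y.testBit 0) (y >>> 1) = y := Nat.bit_testBit_zero_shiftRight_one y
      have h2 : 2 ^ (m + 1) = Nat.bit false (2 ^ m) := by simp [Nat.bit_val]; ring
      have hq : y >>> 1 < 2 ^ m := by
        have := Nat.shiftRight_one y
        have hp : 2 ^ (m + 1) = 2 * 2 ^ m := by ring
        omega
      calc 2 ^ (m + 1) ^^^ y
          = Nat.bit false (2 ^ m) ^^^ Nat.bit (y.testBit 0) (y >>> 1) := by rw [hb, ← h2]
        _ = Nat.bit (bne false (y.testBit 0)) (2 ^ m ^^^ y >>> 1) := Nat.xor_bit ..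
        _ = Nat.bit (y.testBit 0) (2 ^ m + y >>> 1) := by
              rw [ih _ hq]; cases y.testBit 0 <;> rfl
        _ = 2 ^ (m + 1) + y := by
              have hv : Nat.bit (y.testBit 0) (y >>> 1) = 2 * (y >>> 1) + (y.testBit 0).toNat :=
                Nat.bit_val ..
              have hv2 : Nat.bit (y.testBit 0) (2 ^ m + y >>> 1)
                  = 2 * (2 ^ m + y >>> 1) + (y.testBit 0).toNat := Nat.bit_val ..
              have hp : 2 ^ (m + 1) = 2 * 2 ^ m := by ring
              omega

-- ---- the mathematical value both programs compute ----

-- suffix mask for a toggle at t, as a Nat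
def pvMsk (n t : Int) : Nat := 2 ^ (n - t + 1).toNat - 1

-- A's fused loop value over the remaining list of range values, with running parity p
def pvG (T : List Int) (p : Bool) : List Int → Nat
  | [] => 0
  | v :: V =>
      let q := xor p (decide (v ∈ T))
      (if q then 2 ^ V.length else 0) + pvG T q V

-- xor of the position masks of the members, structurally over the value list
def pvX (T : List Int) : List Int → Nat
  | [] => 0
  | v :: V => (if v ∈ T then 2 ^ (V.length + 1) - 1 else 0) ^^^ pvX T V

theorem pvX_lt (T : List Int) : ∀ L : List Int, pvX T L < 2 ^ L.length := by
  intro L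
  induction L with
  | nil => simp [pvX]
  | cons v V ih =>
      have h1 : (if v ∈ T then 2 ^ (V.length + 1) - 1 else 0) < 2 ^ (V.length + 1) := by
        split <;> (have := Nat.one_le_two_pow (n := V.length + 1); omega)
      have h2 : pvX T V < 2 ^ (V.length + 1) := by
        have : (2 : Nat) ^ V.length < 2 ^ (V.length + 1) := by
          have := Nat.one_le_two_pow (n := V.length); omega
        omega
      simpa [pvX] using Nat.xor_lt_two_pow h1 h2

theorem pvG_eq_pvX (T : List Int) :
    ∀ (L : List Int) (p : Bool),
      pvG T p L = (if p then 2 ^ L.length - 1 else 0) ^^^ pvX T L := by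
  intro L
  induction L with
  | nil => intro p; cases p <;> simp [pvG, pvX]
  | cons v V ih =>
      intro p
      have hm : (2 : Nat) ^ V.length ^^^ (2 ^ V.length - 1) = 2 ^ (V.length + 1) - 1 := by
        have h1 : (2 : Nat) ^ V.length - 1 < 2 ^ V.length := by
          have := Nat.one_le_two_pow (n := V.length); omega
        have := pvPowXorAdd V.length (2 ^ V.length - 1) h1
        have hp : (2 : Nat) ^ (V.length + 1) = 2 * 2 ^ V.length := by ring
        omega
      have hq : ∀ q : Bool,
          (if q then 2 ^ V.length else 0) + ((if q then 2 ^ V.length - 1 else 0) ^^^ pvX T V)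
            = (if q then 2 ^ (V.length + 1) - 1 else 0) ^^^ pvX T V := by
        intro q
        cases q with
        | false => simp
        | true =>
            simp only [if_pos trivial]
            have hlt : (2 ^ V.length - 1) ^^^ pvX T V < 2 ^ V.length := by
              apply Nat.xor_lt_two_pow
              · have := Nat.one_le_two_pow (n := V.length); omega
              · exact pvX_lt T V
            rw [← pvPowXorAdd V.length _ hlt, ← Nat.xor_assoc, hm]
      by_cases hv : v ∈ T <;> cases p <;>
        simp only [pvG, pvX, ih, hv, decide_true, decide_false, Bool.xor_false, Bool.xor_true,
          Bool.not_true, Bool.not_false, if_true, if_false,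
          List.length_cons] <;>
        first
          | simpa using hq true
          | simpa using hq false
          | (rw [← Nat.xor_assoc, Nat.xor_self, Nat.zero_xor]; simpa using hq false)

-- ---- A equals pvG over the range values ----

theorem BtoD_concat (R : List Int) (r : Int) : BtoD (R ++ [r]) = 2 * BtoD R + r := by
  simp [BtoD, List.foldl_append]

-- A's (parity, appended list) fold vs the fused (parity, integer) fold over the same bit list
theorem pvFoldInv (L : List Int) (p : Int) (R : List Int) :
    BtoD ((L.foldl (fun (st : Int × List Int) b =>
        (PySem.Int.bxor st.1 b, st.2 ++ [PySem.Int.bxor st.1 b])) (p, R)).2)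
    = (L.foldl (fun (st : Int × Int) b =>
        (PySem.Int.bxor st.1 b, 2 * st.2 + PySem.Int.bxor st.1 b)) (p, BtoD R)).2 := by
  induction L generalizing p R with
  | nil => simp
  | cons b L ih =>
      simp only [List.foldl_cons]
      rw [ih, BtoD_concat]

theorem pvA_fused (n : Int) (T : List Int) :
    grayRank n T
      = ((LtoB n T).foldl (fun (st : Int × Int) b =>
          (PySem.Int.bxor st.1 b, 2 * st.2 + PySem.Int.bxor st.1 b)) ((0 : Int), (0 : Int))).2 := by
  by_cases hn : n ≤ 0
  · simp [grayRank, LtoB,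
      PySem.List.pyRange_one_eq_nil hn (a := 0),
      PySem.List.pyRange_one_eq_nil (show n + 1 ≤ 1 by omega) (a := 1), BtoD]
  · have hA : grayRank n T
        = BtoD (((LtoB n T).foldl (fun (st : Int × List Int) b =>
            (PySem.Int.bxor st.1 b, st.2 ++ [PySem.Int.bxor st.1 b])) ((0 : Int), ([] : List Int))).2) := by
      show BtoD (((PySem.List.pyRange 0 n 1).foldl
          (fun (st : Int × List Int) i =>
            (PySem.Int.bxor st.1 (PySem.List.pyGetD (LtoB n T) i 0),
             st.2 ++ [PySem.Int.bxor st.1 (PySem.List.pyGetD (LtoB n T) i 0)]))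
          ((0 : Int), ([] : List Int))).2) = _
      set bits := LtoB n T with hb
      have hlen : n = (bits.length : Int) := by
        simp [hb, LtoB, PySem.List.length_pyRange_one]; omega
      rw [hlen]
      rw [PySem.List.foldl_pyRange_zero_pyGetD' bits 0
          (fun (st : Int × List Int) b =>
            (PySem.Int.bxor st.1 b, st.2 ++ [PySem.Int.bxor st.1 b])) ((0 : Int), ([] : List Int))]
    rw [hA]
    simpa [BtoD] using pvFoldInv (LtoB n T) 0 []

-- the fused Int fold over the 0/1 bits is the Nat-valued pvG over the range values
theorem pvFused_eq_pvG (T : List Int) :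
    ∀ (V : List Int) (p : Bool) (a : Nat),
      ((V.map (fun i => if i ∈ T then (1 : Int) else 0)).foldl
          (fun (st : Int × Int) b =>
            (PySem.Int.bxor st.1 b, 2 * st.2 + PySem.Int.bxor st.1 b))
          ((if p then (1 : Int) else 0), (a : Int))).2
        = ((a * 2 ^ V.length + pvG T p V : Nat) : Int) := by
  intro V
  induction V with
  | nil => intro p a; simp [pvG]
  | cons v V ih =>
      intro p a
      have hx : PySem.Int.bxor (if p then (1 : Int) else 0) (if v ∈ T then (1 : Int) else 0)
          = (if xor p (decide (v ∈ T)) then (1 : Int) else 0) := by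
        by_cases hv : v ∈ T <;> cases p <;> simp [hv] <;> decide
      have hacc : 2 * (a : Int) + (if xor p (decide (v ∈ T)) then (1 : Int) else 0)
          = ((2 * a + (if xor p (decide (v ∈ T)) then 1 else 0) : Nat) : Int) := by
        cases xor p (decide (v ∈ T)) <;> push_cast <;> ring
      simp only [List.map_cons, List.foldl_cons, hx, hacc]
      rw [ih (xor p (decide (v ∈ T)))]
      simp only [pvG, List.length_cons]
      cases xor p (decide (v ∈ T)) <;> push_cast [pow_succ] <;> norm_num <;> ring

theorem pvA_eq_pvX (n : Int) (T : List Int) :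
    grayRank n T = (pvX T (PySem.List.pyRange 1 (n + 1) 1) : Int) := by
  rw [pvA_fused]
  have h := pvFused_eq_pvG T (PySem.List.pyRange 1 (n + 1) 1) false 0
  norm_num at h
  simp only [LtoB]
  rw [h, pvG_eq_pvX]
  simp

-- ---- B equals a Nat xor fold over set(T) ----

def pvY (n : Int) : List Int → Nat → Nat
  | [], r => r
  | t :: S, r => pvY n S (if 1 ≤ t ∧ t ≤ n then r ^^^ pvMsk n t else r)

theorem pvB_eq_pvY (n : Int) :
    ∀ (S : List Int) (r : Nat),
      (S.foldl (fun result t =>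
          if 1 ≤ t ∧ t ≤ n then PySem.Int.bxor result ((1 <<< (n - t + 1).toNat) - 1) else result)
        ((r : Nat) : Int))
      = ((pvY n S r : Nat) : Int) := by
  intro S
  induction S with
  | nil => intro r; simp [pvY]
  | cons t S ih =>
      intro r
      simp only [List.foldl_cons, pvY]
      by_cases h : 1 ≤ t ∧ t ≤ n
      · have h2 : (1 : Nat) ≤ 2 ^ (n - t + 1).toNat := Nat.one_le_two_pow
        have hsh : ((1 <<< (n - t + 1).toNat : Nat) : Int) - 1 = ((pvMsk n t : Nat) : Int) := by
          simp [pvMsk, Nat.one_shiftLeft, Nat.cast_sub h2]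
        rw [if_pos h, if_pos h, hsh, PySem.Int.bxor_natCast, ih]
      · rw [if_neg h, if_neg h, ih]

-- ---- both Nat values are the xor of the masks of the in-range members, via a Finset fold ----

noncomputable def pvW (n : Int) (T : List Int) (a : Int) : Nat :=
  Finset.fold HXor.hXor 0 (pvMsk n) ((Finset.Icc a n).filter (· ∈ T))

theorem pvX_eq_pvW (n : Int) (T : List Int) :
    ∀ (k : Nat) (a : Int), (n + 1 - a).toNat = k →
      pvX T (PySem.List.pyRange a (n + 1) 1) = pvW n T a := by
  intro k
  induction k with
  | zero =>
      intro a hk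
      have ha : n + 1 ≤ a := by omega
      rw [PySem.List.pyRange_one_eq_nil ha]
      have : Finset.Icc a n = ∅ := Finset.Icc_eq_empty (by omega)
      simp [pvX, pvW, this]
  | succ k ih =>
      intro a hk
      have ha : a < n + 1 := by omega
      rw [PySem.List.pyRange_one_cons ha]
      have hlen : (PySem.List.pyRange (a + 1) (n + 1) 1).length = (n - a).toNat := by
        rw [PySem.List.length_pyRange_one]; omega
      have hexp : (n - a).toNat + 1 = (n - a + 1).toNat := by omega
      have hicc : Finset.Icc a n = insert a (Finset.Icc (a + 1) n) :=
        (Finset.insert_Icc_add_one_left_eq_Icc (by omega)).symm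
      have hnotmem : a ∉ Finset.filter (· ∈ T) (Finset.Icc (a + 1) n) := by
        intro hmem
        rw [Finset.mem_filter, Finset.mem_Icc] at hmem
        omega
      have hrest := ih (a + 1) (by omega)
      by_cases hv : a ∈ T
      · have : Finset.filter (· ∈ T) (Finset.Icc a n)
            = insert a (Finset.filter (· ∈ T) (Finset.Icc (a + 1) n)) := by
          rw [hicc, Finset.filter_insert, if_pos hv]
        simp only [pvX, hlen, hexp, if_pos hv, pvW, this,
          Finset.fold_insert hnotmem]
        rw [hrest]
        rfl
      · have : Finset.filter (· ∈ T) (Finset.Icc a n)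
            = Finset.filter (· ∈ T) (Finset.Icc (a + 1) n) := by
          rw [hicc, Finset.filter_insert, if_neg hv]
        simp only [pvX, hlen, hexp, if_neg hv, pvW, this, Nat.zero_xor]
        exact hrest

theorem pvY_fold_xor (n : Int) :
    ∀ (S : List Int) (r : Nat),
      pvY n S r = ((S.filter (fun t => decide (1 ≤ t ∧ t ≤ n))).map (pvMsk n)).foldl HXor.hXor r := by
  intro S
  induction S with
  | nil => intro r; simp [pvY]
  | cons t S ih =>
      intro r
      by_cases h : 1 ≤ t ∧ t ≤ n
      · simp only [pvY, if_pos h, List.filter_cons, decide_eq_true h, ite_true,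
          List.map_cons, List.foldl_cons]
        exact ih _
      · simp only [pvY, if_neg h, List.filter_cons]
        rw [decide_eq_false h]
        simpa using ih r

theorem pvY_eq_pvW (n : Int) (T : List Int) :
    pvY n (PySem.Set.ofList T) 0 = pvW n T 1 := by
  have hnd : (PySem.Set.ofList T).Nodup := PySem.Set.nodup_ofList T
  have hndf : ((PySem.Set.ofList T).filter (fun t => decide (1 ≤ t ∧ t ≤ n))).Nodup :=
    hnd.filter _
  have hset : Finset.filter (· ∈ T) (Finset.Icc 1 n)
      = ⟨((PySem.Set.ofList T).filter (fun t => decide (1 ≤ t ∧ t ≤ n)) : List Int), hndf⟩ := by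
    apply Finset.ext
    intro t
    simp [Finset.mem_filter, Finset.mem_Icc, List.mem_filter, PySem.Set.mem_ofList]
    tauto
  rw [pvY_fold_xor, pvW, hset]
  show _ = Multiset.fold HXor.hXor 0
      (Multiset.map (pvMsk n) (((PySem.Set.ofList T).filter
        (fun t => decide (1 ≤ t ∧ t ≤ n)) : List Int) : Multiset Int))
  rw [Multiset.map_coe, Multiset.coe_fold_l]

theorem pvB_final (n : Int) (T : List Int) :
    grayRank_alt n T = ((pvY n (PySem.Set.ofList T) 0 : Nat) : Int) := by
  have hb := pvB_eq_pvY n (PySem.Set.ofList T) 0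
  norm_num at hb
  simpa [grayRank_alt] using hb

-- ===== VERDICT (by name: the statement is the Claim_ definition above) =====
theorem grayRank_spec : Claim_equal_grayRank := by
  intro n T _
  show grayRank n T = grayRank_alt n T
  rw [pvA_eq_pvX, pvB_final, pvX_eq_pvW n T (n + 1 - 1).toNat 1 rfl, pvY_eq_pvW]
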